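-- pv_equiv track=rewrite | github.com/benwatson528/advent-of-code-24 | main/day12/garden_groups.py | find_line_matches
-- ===== SOURCE A (Python) =====
-- def find_line_matches(plants, direction, reverse=False):
--     if reverse:
--         plants = [(y, x) for x, y in plants]
--     edges = 0
--     for wall in range(min(y for x, y in plants), max(y for x, y in plants) + 1):
--         plants_in_line = sorted(
--             [p for p in plants if p[1] == wall and (p[0], p[1] + direction) not in plants],
--             key=lambda p: p[0])
--         connected_plants = sum(abs(x1 - x2) == 1 for (x1, _), (x2, _) in zip(plants_in_line, plants_in_line[1:]))
--         edges += len(plants_in_line) - connected_plants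
--     return edges
-- ===== SOURCE B (Python) =====
-- def find_line_matches(plants, direction, reverse=False):
--     if reverse:
--         plants = [(y, x) for x, y in plants]
--     plant_set = set(plants)
--     lines = {}
--     for x, y in plants:
--         if (x, y + direction) not in plant_set:
--             lines.setdefault(y, []).append(x)
--     edges = 0
--     for xs in lines.values():
--         xs.sort()
--         edges += len(xs)
--         for a, b in zip(xs, xs[1:]):
--             if b - a == 1:
--                 edges -= 1
--     return edges
-- ===== Notes on version B (the rewrite author's own statement) =====
-- stated objective: faster
-- what changed: A rescans the whole plant list for every wall line in range(min_y, max_y+1) with O(n) list-membership tests inside the filter; B makes one pass that buckets boundary plants by line into a dict using a set for the neighbour test, then sorts and scans each bucket once.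
-- outside the precondition, e.g. on find_line_matches([], 1, False): A raises ValueError, B returns 0
import Mathlib
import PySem

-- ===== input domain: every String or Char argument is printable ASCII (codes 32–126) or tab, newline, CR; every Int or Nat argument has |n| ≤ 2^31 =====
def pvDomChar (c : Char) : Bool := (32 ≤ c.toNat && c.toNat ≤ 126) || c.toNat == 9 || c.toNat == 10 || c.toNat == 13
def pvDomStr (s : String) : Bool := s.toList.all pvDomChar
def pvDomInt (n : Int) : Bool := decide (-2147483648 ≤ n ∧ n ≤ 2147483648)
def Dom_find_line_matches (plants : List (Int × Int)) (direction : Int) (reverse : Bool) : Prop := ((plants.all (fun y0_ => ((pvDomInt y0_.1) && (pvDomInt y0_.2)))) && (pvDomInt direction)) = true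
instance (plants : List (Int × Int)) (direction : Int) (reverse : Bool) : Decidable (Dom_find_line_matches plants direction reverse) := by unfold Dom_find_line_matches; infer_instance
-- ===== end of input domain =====

-- B replaces A's scan of every wall line over the whole plant list (and its list-membership
-- tests) by one grouping pass: bucket boundary plants by line in a dict, set membership,
-- then one sort + adjacent scan per line. Return value only; neither program mutates its input.

-- ===== PORT A =====
-- abs(n) on int
def pyAbsA (n : Int) : Int := if n < 0 then -n else n

def find_line_matches (plants : List (Int × Int)) (direction : Int) (reverse : Bool) : Int :=
  -- if reverse: plants = [(y, x) for x, y in plants]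
  let plants := if reverse then plants.map (fun p => (p.2, p.1)) else plants
  -- min/max over the generator (y for x, y in plants); A raises ValueError when plants == []
  match PySem.List.min? (plants.map (fun p => p.2)) (fun y => y),
        PySem.List.max? (plants.map (fun p => p.2)) (fun y => y) with
  | some mn, some mx =>
      (PySem.List.pyRange mn (mx + 1) 1).foldl (fun edges wall =>
        let plants_in_line := PySem.List.sorted
          (plants.filter (fun p => p.2 == wall && !(plants.contains (p.1, p.2 + direction))))
          (fun p => p.1) false
        -- sum(abs(x1 - x2) == 1 for …) over zip(l, l[1:]): a 0/1 sum is a count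
        let connected_plants : Int :=
          ((plants_in_line.zip plants_in_line.tail).countP
            (fun q => pyAbsA (q.1.1 - q.2.1) == 1) : Int)
        edges + ((plants_in_line.length : Int) - connected_plants)) 0
  | _, _ => 0

-- ===== PORT B =====
def find_line_matches_alt (plants : List (Int × Int)) (direction : Int) (reverse : Bool) : Int :=
  let plants := if reverse then plants.map (fun p => (p.2, p.1)) else plants
  let pset : PySem.Set (Int × Int) := PySem.Set.ofList plants
  -- lines.setdefault(y, []).append(x)  for boundary plants
  let lines : PySem.Dict Int (List Int) :=
    plants.foldl (fun d p =>
      if !(PySem.Set.contains pset (p.1, p.2 + direction)) then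
        d.modify p.2 [] (fun xs => xs ++ [p.1])
      else d) PySem.Dict.empty
  lines.values.foldl (fun edges xs =>
    let s := PySem.List.sorted xs (fun x => x) false
    (s.zip s.tail).foldl (fun e q => if q.2 - q.1 == 1 then e - 1 else e)
      (edges + (s.length : Int))) 0

-- ===== PRECONDITION & SPEC =====
-- Python A raises ValueError (min of an empty sequence) when plants == []; excluded here.
def Pre_find_line_matches (plants : List (Int × Int)) (direction : Int) (reverse : Bool) : Prop :=
  plants ≠ []
instance (plants : List (Int × Int)) (direction : Int) (reverse : Bool) : Decidable (Pre_find_line_matches plants direction reverse) := by unfold Pre_find_line_matches; infer_instance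

def pvWitness_find_line_matches : (List (Int × Int)) × Int × Bool := ([(0, 0), (1, 0), (1, 1)], 1, false)

def Spec_find_line_matches (plants : List (Int × Int)) (direction : Int) (reverse : Bool) (out : Int) : Prop := out = find_line_matches_alt plants direction reverse
instance (plants : List (Int × Int)) (direction : Int) (reverse : Bool) (out : Int) : Decidable (Spec_find_line_matches plants direction reverse out) := by unfold Spec_find_line_matches; infer_instance

-- ===== CLAIM (what is proved, stated in full; the proofs are below) =====
def Claim_equal_find_line_matches : Prop := ∀ (plants : List (Int × Int)) (direction : Int) (reverse : Bool), Dom_find_line_matches plants direction reverse → Pre_find_line_matches plants direction reverse → Spec_find_line_matches plants direction reverse (find_line_matches plants direction reverse)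

-- ===== LEMMAS AND PROOFS =====

-- boundary plants (those whose `direction` neighbour is absent)
def pvBl (plants : List (Int × Int)) (direction : Int) : List (Int × Int) :=
  plants.filter (fun p => !(plants.contains (p.1, p.2 + direction)))

-- x-coordinates of the boundary plants on line y
def pvG (bl : List (Int × Int)) (y : Int) : List Int :=
  (bl.filter (fun p => p.2 == y)).map (fun p => p.1)

-- per-line edge count, B's formulation
def pvFB (xs : List Int) : Int :=
  ((PySem.List.sorted xs (fun x => x) false).length : Int) -
    (((PySem.List.sorted xs (fun x => x) false).zip
        (PySem.List.sorted xs (fun x => x) false).tail).countP (fun q => q.2 - q.1 == 1) : Int)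

theorem pv_inner_sub (l : List (Int × Int)) (p : Int × Int → Bool) (a : Int) :
    l.foldl (fun e q => if p q then e - 1 else e) a = a - (l.countP p : Int) := by
  induction l generalizing a with
  | nil => simp
  | cons x t ih =>
    simp only [List.foldl_cons, List.countP_cons, ih]
    by_cases h : p x
    · simp [h]; ring
    · simp [h]

theorem pv_zip_tail_pairwise {α : Type} {R : α → α → Prop} :
    ∀ {l : List α}, l.Pairwise R → ∀ q ∈ l.zip l.tail, R q.1 q.2 := by
  intro l
  induction l with
  | nil => intro _ q hq; simp at hq
  | cons x t ih =>
    intro h q hq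
    cases t with
    | nil => simp at hq
    | cons y t' =>
      simp only [List.tail_cons, List.zip_cons_cons, List.mem_cons] at hq
      rcases hq with rfl | hq
      · exact (List.pairwise_cons.mp h).1 y (by simp)
      · exact ih h.tail q (by simpa using hq)

-- A's per-line value equals B's on the line's bucket
theorem pv_line_eq (plants : List (Int × Int)) (direction wall : Int) (L : List (Int × Int))
    (hL : L = PySem.List.sorted
        (plants.filter (fun p => p.2 == wall && !(plants.contains (p.1, p.2 + direction))))
        (fun p => p.1) false) :
    (L.length : Int) -
        ((L.zip L.tail).countP (fun q => pyAbsA (q.1.1 - q.2.1) == 1) : Int)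
    = pvFB (pvG (pvBl plants direction) wall) := by
  have hsplit : plants.filter (fun p => p.2 == wall && !(plants.contains (p.1, p.2 + direction)))
      = (pvBl plants direction).filter (fun p => p.2 == wall) := by
    unfold pvBl
    rw [List.filter_filter]
  have hs : PySem.List.sorted (pvG (pvBl plants direction) wall) (fun x => x) false
      = L.map (fun p => p.1) := by
    apply PySem.List.sorted_id_eq_of_perm_of_pairwise
    · apply List.Perm.map
      rw [hL, hsplit]
      exact PySem.List.sorted_perm _ _ _
    · rw [hL]
      exact PySem.List.sorted_map_key_pairwise _ _
  unfold pvFB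
  rw [hs]
  have hlen : (L.map (fun p : Int × Int => p.1)).length = L.length := by simp
  have hpw : L.Pairwise (fun a b : Int × Int => a.1 ≤ b.1) := by
    rw [hL]; exact PySem.List.sorted_pairwise _ _
  have hzip : (L.map (fun p : Int × Int => p.1)).zip (L.map (fun p : Int × Int => p.1)).tail
      = (L.zip L.tail).map (Prod.map (fun p : Int × Int => p.1) (fun p : Int × Int => p.1)) := by
    rw [← List.map_tail, List.zip_map]
  rw [hlen, hzip, List.countP_map]
  have hcount : (L.zip L.tail).countP
        ((fun q : Int × Int => q.2 - q.1 == 1) ∘ Prod.map (fun p : Int × Int => p.1) (fun p : Int × Int => p.1))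
      = (L.zip L.tail).countP (fun q => pyAbsA (q.1.1 - q.2.1) == 1) := by
    apply List.countP_congr
    intro q hq
    have hle : q.1.1 ≤ q.2.1 := pv_zip_tail_pairwise hpw q hq
    simp only [Function.comp, Prod.map, pyAbsA]
    constructor <;> intro h <;> (simp_all; omega)
  rw [hcount]

-- sums of a function over two Nodup lists agree when it vanishes off their common part
theorem pv_sum_support (l₁ l₂ : List Int) (f : Int → Int) (h₁ : l₁.Nodup) (h₂ : l₂.Nodup)
    (z₁ : ∀ y ∈ l₁, y ∉ l₂ → f y = 0) (z₂ : ∀ y ∈ l₂, y ∉ l₁ → f y = 0) :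
    (l₁.map f).sum = (l₂.map f).sum := by
  rw [← List.sum_toFinset f h₁, ← List.sum_toFinset f h₂]
  rw [← Finset.sum_subset (Finset.inter_subset_left : l₁.toFinset ∩ l₂.toFinset ⊆ l₁.toFinset)
        (by intro x hx hx'; exact z₁ x (List.mem_toFinset.mp hx)
              (fun h => hx' (Finset.mem_inter.mpr ⟨hx, List.mem_toFinset.mpr h⟩))),
      ← Finset.sum_subset (Finset.inter_subset_right : l₁.toFinset ∩ l₂.toFinset ⊆ l₂.toFinset)
        (by intro x hx hx'; exact z₂ x (List.mem_toFinset.mp hx)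
              (fun h => hx' (Finset.mem_inter.mpr ⟨List.mem_toFinset.mpr h, hx⟩)))]

-- the values of B's dict are the per-line buckets, one per distinct boundary line
theorem pv_dict_values (plants : List (Int × Int)) (direction : Int) :
    (plants.foldl (fun d p =>
      if !(PySem.Set.contains (PySem.Set.ofList plants) (p.1, p.2 + direction)) then
        d.modify p.2 [] (fun xs => xs ++ [p.1])
      else d) PySem.Dict.empty).values
    = (PySem.Set.ofList ((pvBl plants direction).map (fun p => p.2))).map
        (fun y => pvG (pvBl plants direction) y) := by
  have hset : ∀ z : Int × Int, PySem.Set.contains (PySem.Set.ofList plants) z = plants.contains z := by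
    intro z
    rw [PySem.Set.contains_eq_listContains]
    simp [List.contains_eq_mem, PySem.Set.mem_ofList]
  have hcond : (plants.foldl (fun d p =>
      if !(PySem.Set.contains (PySem.Set.ofList plants) (p.1, p.2 + direction)) then
        d.modify p.2 [] (fun xs => xs ++ [p.1])
      else d) PySem.Dict.empty)
      = ((pvBl plants direction).foldl (fun d p => d.modify p.2 [] (fun xs => xs ++ [p.1]))
          PySem.Dict.empty) := by
    rw [PySem.List.foldl_if_eq_foldl_filter]
    unfold pvBl
    congr 1
    apply List.filter_congr
    intro x _
    simp [hset]
  rw [hcond]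
  set bl := pvBl plants direction with hbl
  have hkeys : ((bl.foldl (fun d p => d.modify p.2 [] (fun xs => xs ++ [p.1]))
      PySem.Dict.empty)).keys = PySem.Set.ofList (bl.map (fun p => p.2)) := by
    rw [PySem.Dict.keys_foldl_modify_key (key := fun p : Int × Int => p.2)]
    simp [PySem.Set.update_nil_left]
  have hnd : ((bl.foldl (fun d p => d.modify p.2 [] (fun xs => xs ++ [p.1]))
      PySem.Dict.empty)).keys.Nodup := by
    apply PySem.Dict.nodup_keys_foldl_modify_key
    simp
  have hgetD : ∀ y, ((bl.foldl (fun d p => d.modify p.2 [] (fun xs => xs ++ [p.1]))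
      PySem.Dict.empty)).getD y [] = pvG bl y := by
    intro y
    rw [show (bl.foldl (fun d p => d.modify p.2 [] (fun xs => xs ++ [p.1])) PySem.Dict.empty)
        = ((bl.map Prod.swap).foldl (fun d q => d.modify q.1 [] (fun xs => xs ++ [q.2]))
            PySem.Dict.empty) by rw [List.foldl_map]; rfl]
    rw [PySem.Dict.getD_foldl_modify_append]
    simp [pvG, List.filter_map, Function.comp_def, Prod.swap]
  rw [PySem.Dict.values_eq_map_keys _ hnd []]
  rw [hkeys]
  apply List.map_congr_left
  intro y _
  exact hgetD y

theorem pv_core (plants : List (Int × Int)) (direction : Int) :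
    find_line_matches plants direction false = find_line_matches_alt plants direction false := by
  simp only [find_line_matches, find_line_matches_alt, Bool.false_eq_true, if_false]
  rw [pv_dict_values plants direction]
  -- B's outer loop is 0 + the sum of pvFB over the buckets
  have hBbody : ∀ (acc : Int) (xs : List Int),
      ((PySem.List.sorted xs (fun x => x) false).zip
          (PySem.List.sorted xs (fun x => x) false).tail).foldl
        (fun e q => if (q.2 - q.1 == 1) = true then e - 1 else e)
        (acc + ((PySem.List.sorted xs (fun x => x) false).length : Int))
      = acc + pvFB xs := by
    intro acc xs
    rw [pv_inner_sub]
    unfold pvFB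
    ring
  rw [PySem.List.foldl_congr_mem
        (l := (PySem.Set.ofList ((pvBl plants direction).map (fun p => p.2))).map
            (fun y => pvG (pvBl plants direction) y))
        (init := 0)
        (f := fun (edges : Int) (xs : List Int) =>
          ((PySem.List.sorted xs (fun x => x) false).zip
              (PySem.List.sorted xs (fun x => x) false).tail).foldl
            (fun e q => if (q.2 - q.1 == 1) = true then e - 1 else e)
            (edges + ((PySem.List.sorted xs (fun x => x) false).length : Int)))
        (g := fun (acc : Int) (xs : List Int) => acc + pvFB xs)
        (fun acc xs _ => hBbody acc xs),
      PySem.List.foldl_add, List.map_map]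
  cases hmn : PySem.List.min? (plants.map (fun p => p.2)) (fun y => y) with
  | none =>
      have h0 : plants = [] := by
        rw [PySem.List.min?_eq_none_iff] at hmn
        simpa using hmn
      subst h0
      simp [pvBl]
  | some mn =>
  cases hmx : PySem.List.max? (plants.map (fun p => p.2)) (fun y => y) with
  | none =>
      have h0 : plants = [] := by
        rw [PySem.List.max?_eq_none_iff] at hmx
        simpa using hmx
      subst h0
      rw [show PySem.List.min? (List.map (fun p : Int × Int => p.2) []) (fun y => y) = none
            from rfl] at hmn
      cases hmn
  | some mx =>
  simp only []
  -- A's loop is 0 + the sum of the per-line values over the wall range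
  rw [PySem.List.foldl_add]
  rw [List.map_congr_left (fun wall _ => pv_line_eq plants direction wall _ rfl)]
  -- the two sums range over different index lists but the same support
  have hsum := pv_sum_support (PySem.List.pyRange mn (mx + 1) 1)
      (PySem.Set.ofList ((pvBl plants direction).map (fun p => p.2)))
      (fun y => pvFB (pvG (pvBl plants direction) y))
      (PySem.List.nodup_pyRange_one mn (mx + 1)) (PySem.Set.nodup_ofList _)
      (by
        intro y _ hy2
        have hnil : pvG (pvBl plants direction) y = [] := by
          unfold pvG
          have hfil : (pvBl plants direction).filter (fun p => p.2 == y) = [] := by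
            rw [List.filter_eq_nil_iff]
            intro p hp h
            exact hy2 ((PySem.Set.mem_ofList _ _).mpr (List.mem_map.mpr ⟨p, hp, by simpa using h⟩))
          rw [hfil]
          rfl
        show pvFB (pvG (pvBl plants direction) y) = 0
        rw [hnil]
        decide)
      (by
        intro y hy1 hy2
        exfalso
        apply hy2
        obtain ⟨p, hp, rfl⟩ := List.mem_map.mp ((PySem.Set.mem_ofList _ _).mp hy1)
        have hpl : p ∈ plants := (List.mem_filter.mp hp).1
        have hmem : p.2 ∈ plants.map (fun p => p.2) := List.mem_map.mpr ⟨p, hpl, rfl⟩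
        have h1 : mn ≤ p.2 := PySem.List.min?_isMin hmn _ hmem
        have h2 : p.2 ≤ mx := PySem.List.max?_isMax hmx _ hmem
        exact PySem.List.mem_pyRange_one.mpr ⟨h1, by omega⟩)
  simpa using hsum

-- ===== VERDICT (by name: the statement is the Claim_ definition above) =====
theorem find_line_matches_spec : Claim_equal_find_line_matches := by
  intro plants direction reverse _ _
  unfold Spec_find_line_matches
  cases reverse with
  | false => exact (pv_core plants direction).symm ▸ rfl
  | true =>
      have := pv_core (plants.map (fun p => (p.2, p.1))) direction
      simpa [find_line_matches, find_line_matches_alt] using this
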